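-- pv_equiv track=rewrite | github.com/ybenesya/pv-system-calc | gui.py | create_duration_array_with_none
-- ===== SOURCE A (Python) =====
-- import math
--
-- def create_duration_array_with_none(duration_array):
--     """
--     This function sparse the duration_array
--     :param duration_array: array contains all the dates in the duration days that the user enters
--     :return: duration_array_with_none
--     """
--     duration_array_with_none = []
--     x = math.floor(len(duration_array) / 24)
--     index = 0
--     if x == 0:
--         return duration_array
--     for d in duration_array:
--         if index%(x+1) == 0:
--             duration_array_with_none.append(d)
--         else:
--             duration_array_with_none.append(None)
--         index +=1
--
--     return duration_array_with_none
-- ===== SOURCE B (Python) =====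
-- def create_duration_array_with_none(duration_array):
--     x = len(duration_array) // 24
--     if x == 0:
--         return duration_array
--     out = []
--     rest = duration_array
--     while rest:
--         out.append(rest[0])
--         out.extend([None] * len(rest[1:x + 1]))
--         rest = rest[x + 1:]
--     return out
-- ===== Notes on version B (the rewrite author's own statement) =====
-- stated objective: alternative
-- what changed: Replaced the per-element index/modulus-gated loop by chunk consumption: repeatedly take a block of x+1 elements, keep its head and pad the rest with None, so no index counter or modulus is computed.
import Mathlib
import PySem

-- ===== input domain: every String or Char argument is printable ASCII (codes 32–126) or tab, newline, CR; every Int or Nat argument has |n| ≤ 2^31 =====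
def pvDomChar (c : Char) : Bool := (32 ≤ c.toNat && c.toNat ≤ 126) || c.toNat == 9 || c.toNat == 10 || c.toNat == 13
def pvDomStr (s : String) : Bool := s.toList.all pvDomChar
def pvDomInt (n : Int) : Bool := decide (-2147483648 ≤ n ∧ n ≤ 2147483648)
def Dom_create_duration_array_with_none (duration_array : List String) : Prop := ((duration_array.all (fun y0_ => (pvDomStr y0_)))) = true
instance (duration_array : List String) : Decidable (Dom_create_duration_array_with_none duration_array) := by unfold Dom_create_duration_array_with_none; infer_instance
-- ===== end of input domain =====

-- B keeps/pads by consuming chunks of size x+1 instead of A's index-modulus test per element (objective: alternative decomposition).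

-- ===== PORT A =====
def create_duration_array_with_none (duration_array : List String) : List (Option String) :=
  let x : Int := PySem.Int.floordiv (duration_array.length : Int) 24
  if x == 0 then duration_array.map some
  else
    (duration_array.foldl
      (fun (st : List (Option String) × Int) d =>
        (st.1 ++ [if PySem.Int.mod st.2 (x + 1) == 0 then some d else none], st.2 + 1))
      ([], 0)).1

-- ===== PORT B =====
-- the while loop over the shrinking 'rest': keep head, pad len(rest[1:x+1]) Nones, recurse on rest[x+1:]
def sparseChunks (x : Nat) : List String → List (Option String)
  | [] => []
  | d :: tl => some d :: ((tl.take x).map (fun _ => none) ++ sparseChunks x (tl.drop x))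
termination_by xs => xs.length
decreasing_by simp

def create_duration_array_with_none_alt (duration_array : List String) : List (Option String) :=
  let x : Int := PySem.Int.floordiv (duration_array.length : Int) 24
  if x == 0 then duration_array.map some
  else sparseChunks x.toNat duration_array

-- ===== PRECONDITION & SPEC =====
def Spec_create_duration_array_with_none (duration_array : List String) (out : List (Option String)) : Prop := out = create_duration_array_with_none_alt duration_array
instance (duration_array : List String) (out : List (Option String)) : Decidable (Spec_create_duration_array_with_none duration_array out) := by unfold Spec_create_duration_array_with_none; infer_instance

-- ===== CLAIM (what is proved, stated in full; the proofs are below) =====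
def Claim_equal_create_duration_array_with_none : Prop := ∀ (duration_array : List String), Dom_create_duration_array_with_none duration_array → Spec_create_duration_array_with_none duration_array (create_duration_array_with_none duration_array)

-- ===== LEMMAS AND PROOFS =====

-- what A's loop produces, starting at index i
def spread (k : Int) : List String → Int → List (Option String)
  | [], _ => []
  | d :: tl, i => (if PySem.Int.mod i k == 0 then some d else none) :: spread k tl (i + 1)

theorem foldA_spread (k : Int) : ∀ (xs : List String) (acc : List (Option String)) (i : Int),
    (xs.foldl (fun (st : List (Option String) × Int) d =>
        (st.1 ++ [if PySem.Int.mod st.2 k == 0 then some d else none], st.2 + 1)) (acc, i)).1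
      = acc ++ spread k xs i := by
  intro xs
  induction xs with
  | nil => intro acc i; simp [spread]
  | cons d tl ih =>
      intro acc i
      simp only [List.foldl, spread, ih, List.append_assoc, List.singleton_append]

theorem spread_period (k : Int) (hk : 0 < k) : ∀ (xs : List String) (i : Int),
    spread k xs (i + k) = spread k xs i := by
  intro xs
  induction xs with
  | nil => intro i; simp [spread]
  | cons d tl ih =>
      intro i
      have hm : PySem.Int.mod (i + k) k = PySem.Int.mod i k := by
        rw [PySem.Int.mod_eq_emod_of_pos hk, PySem.Int.mod_eq_emod_of_pos hk,
          Int.add_emod_right]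
      have : i + k + 1 = (i + 1) + k := by ring
      simp only [spread, hm, this, ih]

theorem spread_chunk (k : Int) (hk : 0 < k) : ∀ (xs : List String) (j : Int),
    1 ≤ j → j ≤ k →
    spread k xs j = ((xs.take (k - j).toNat).map (fun _ => none)) ++ spread k (xs.drop (k - j).toNat) 0 := by
  intro xs
  induction xs with
  | nil => intro j _ _; simp [spread]
  | cons d tl ih =>
      intro j h1 h2
      by_cases hjk : j = k
      · have hm : PySem.Int.mod j k = 0 := by
          rw [hjk, PySem.Int.mod_eq_emod_of_pos hk]; simp
        have hm0 : PySem.Int.mod (0 : Int) k = 0 := by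
          rw [PySem.Int.mod_eq_emod_of_pos hk]; simp
        have hp : spread k tl (j + 1) = spread k tl 1 := by
          have := spread_period k hk tl 1
          have h : (1 : Int) + k = j + 1 := by omega
          rw [h] at this; exact this
        have hz : (k - j).toNat = 0 := by omega
        simp only [spread, hm, hm0, hz, List.take_zero, List.map_nil,
          List.drop_zero, List.nil_append, hp, beq_self_eq_true, if_pos]
        norm_num
      · have hjlt : j < k := lt_of_le_of_ne h2 hjk
        have hm : ¬ (PySem.Int.mod j k == 0) = true := by
          rw [PySem.Int.mod_eq_emod_of_pos hk, Int.emod_eq_of_lt (by omega) hjlt]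
          simp only [beq_iff_eq]
          omega
        have hnat : (k - j).toNat = ((k - (j + 1)).toNat) + 1 := by omega
        simp only [spread, hm, hnat, List.take_succ_cons, List.map_cons,
          List.drop_succ_cons, List.cons_append]
        rw [ih (j + 1) (by omega) (by omega)]
        simp

theorem spread_eq_sparseChunks (k : Int) (hk : 0 < k) : ∀ (n : Nat) (xs : List String), xs.length ≤ n →
    spread k xs 0 = sparseChunks (k - 1).toNat xs := by
  intro n
  induction n with
  | zero =>
      intro xs hlen
      have : xs = [] := by cases xs <;> simp_all
      subst this; simp [spread, sparseChunks]
  | succ m ih =>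
      intro xs hlen
      cases xs with
      | nil => simp [spread, sparseChunks]
      | cons d tl =>
          have hm0 : PySem.Int.mod (0 : Int) k == 0 := by
            rw [PySem.Int.mod_eq_emod_of_pos hk]; simp
          simp only [spread, hm0, if_pos, sparseChunks]
          have h1 : spread k tl 1
              = ((tl.take (k - 1).toNat).map (fun _ => none)) ++ spread k (tl.drop (k - 1).toNat) 0 :=
            spread_chunk k hk tl 1 (by omega) (by omega)
          have h01 : (0 : Int) + 1 = 1 := by norm_num
          rw [h01, h1, ih (tl.drop (k - 1).toNat) (by simp at hlen ⊢; omega)]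

-- ===== VERDICT (by name: the statement is the Claim_ definition above) =====
theorem create_duration_array_with_none_spec : Claim_equal_create_duration_array_with_none := by
  intro duration_array _
  unfold Spec_create_duration_array_with_none
  unfold create_duration_array_with_none create_duration_array_with_none_alt
  simp only []
  set x : Int := PySem.Int.floordiv (duration_array.length : Int) 24 with hx
  by_cases h0 : x == 0
  · simp [h0]
  · simp only [h0, Bool.false_eq_true]
    have hxpos : 0 < x := by
      have := PySem.Int.floordiv_eq_ediv_of_pos (a := (duration_array.length : Int)) (b := 24) (by omega)
      have hge : 0 ≤ x := by rw [hx, this]; positivity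
      simp only [beq_iff_eq] at h0
      omega
    have hk : 0 < x + 1 := by omega
    rw [foldA_spread (x + 1) duration_array [] 0, List.nil_append,
      spread_eq_sparseChunks (x + 1) hk duration_array.length duration_array le_rfl]
    norm_num
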